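-- pv_equiv track=rewrite | github.com/pranavjindal29/Competitive-Coding-Archives-Leetcode | 1649-maximum-number-of-non-overlapping-subarrays-with-sum-equals-target/maximum-number-of-non-overlapping-subarrays-with-sum-equals-target.py | maxNonOverlapping
-- ===== SOURCE A (Python) =====
-- from typing import List
--
-- def maxNonOverlapping(nums: List[int], target: int) -> int:
--     f={}
--     f[0]=1;s=0;ans=0
--     for j in nums:
--         s+=j
--         if s-target in f:ans+=1;f={}
--         f[s]=1
--     return ans
-- ===== SOURCE B (Python) =====
-- from typing import List
--
-- def maxNonOverlapping(nums: List[int], target: int) -> int: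
--     # DP over positions: dp[i] = max count in first i elements;
--     # seen maps each prefix-sum value to the latest index where it occurred.
--     seen = {0: 0}
--     dp = [0]
--     s = 0
--     i = 0
--     for x in nums:
--         i += 1
--         s += x
--         d = dp[i - 1]
--         if s - target in seen:
--             k = seen[s - target]
--             if dp[k] + 1 > d:
--                 d = dp[k] + 1
--         dp.append(d)
--         seen[s] = i
--     return dp[i]
-- ===== Notes on version B (the rewrite author's own statement) =====
-- stated objective: alternative
-- what changed: Replaces A's greedy dict-reset scan with a dynamic program: dp[i] = best count over the first i elements, using a map from each prefix-sum value to its latest index, returning dp[n].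
import Mathlib
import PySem

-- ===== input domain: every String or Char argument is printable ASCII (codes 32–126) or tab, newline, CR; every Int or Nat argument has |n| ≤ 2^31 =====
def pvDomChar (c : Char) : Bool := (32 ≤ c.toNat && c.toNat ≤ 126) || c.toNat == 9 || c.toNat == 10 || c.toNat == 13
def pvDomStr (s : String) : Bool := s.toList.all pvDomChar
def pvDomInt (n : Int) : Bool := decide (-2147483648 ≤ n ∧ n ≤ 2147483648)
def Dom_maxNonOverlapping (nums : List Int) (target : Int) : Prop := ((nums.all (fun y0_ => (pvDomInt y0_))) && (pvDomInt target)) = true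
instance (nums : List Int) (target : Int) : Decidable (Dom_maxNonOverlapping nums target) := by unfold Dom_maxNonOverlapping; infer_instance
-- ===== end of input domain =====

-- B replaces A's greedy prefix-sum scan (dict reset at each hit) by a dynamic program over
-- positions (dp over a latest-occurrence map); same O(n) cost, genuinely different algorithm.

-- ===== PORT A =====
-- one loop iteration of A: state (f, s, ans)
def stepA (target : Int) (st : PySem.Dict Int Int × Int × Int) (j : Int) :
    PySem.Dict Int Int × Int × Int :=
  let s := st.2.1 + j
  let fa : PySem.Dict Int Int × Int :=
    if st.1.contains (s - target) then ((PySem.Dict.empty : PySem.Dict Int Int), st.2.2 + 1)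
    else (st.1, st.2.2)
  (fa.1.insert s 1, s, fa.2)

def maxNonOverlapping (nums : List Int) (target : Int) : Int :=
  (nums.foldl (stepA target) ((PySem.Dict.empty : PySem.Dict Int Int).insert 0 1, 0, 0)).2.2

-- ===== PORT B =====
-- one loop iteration of B: state (seen, dp, s, i); `seen.getD … 0` is only read under
-- `seen.contains …`, exactly like Python's guarded `seen[s - target]`
def stepB (target : Int) (st : PySem.Dict Int Int × List Int × Int × Int) (x : Int) :
    PySem.Dict Int Int × List Int × Int × Int :=
  let seen := st.1
  let dp := st.2.1
  let i := st.2.2.2 + 1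
  let s := st.2.2.1 + x
  let d0 := PySem.List.pyGetD dp (i - 1) 0
  let d :=
    if seen.contains (s - target) then
      let k := seen.getD (s - target) 0
      if PySem.List.pyGetD dp k 0 + 1 > d0 then PySem.List.pyGetD dp k 0 + 1 else d0
    else d0
  (seen.insert s i, dp ++ [d], s, i)

def maxNonOverlapping_alt (nums : List Int) (target : Int) : Int :=
  let st := nums.foldl (stepB target)
    ((PySem.Dict.empty : PySem.Dict Int Int).insert 0 0, [0], 0, 0)
  PySem.List.pyGetD st.2.1 st.2.2.2 0

-- ===== PRECONDITION & SPEC =====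
def Spec_maxNonOverlapping (nums : List Int) (target : Int) (out : Int) : Prop := out = maxNonOverlapping_alt nums target
instance (nums : List Int) (target : Int) (out : Int) : Decidable (Spec_maxNonOverlapping nums target out) := by unfold Spec_maxNonOverlapping; infer_instance

-- ===== CLAIM (what is proved, stated in full; the proofs are below) =====
def Claim_equal_maxNonOverlapping : Prop := ∀ (nums : List Int) (target : Int), Dom_maxNonOverlapping nums target → Spec_maxNonOverlapping nums target (maxNonOverlapping nums target)

-- ===== LEMMAS AND PROOFS =====

-- instrumented copy of A's loop state: f, s, ans plus ghost fields c (index of the last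
-- reset, i.e. where the kept dict starts) and i (number of elements consumed)
structure StI where
  f : PySem.Dict Int Int
  s : Int
  a : Int
  c : Nat
  i : Nat

def stepI (target : Int) (st : StI) (j : Int) : StI :=
  let s := st.s + j
  if st.f.contains (s - target) then
    ⟨(PySem.Dict.empty : PySem.Dict Int Int).insert s 1, s, st.a + 1, st.i + 1, st.i + 1⟩
  else
    ⟨st.f.insert s 1, s, st.a, st.c, st.i + 1⟩

def runI (target : Int) (xs : List Int) : StI :=
  xs.foldl (stepI target) ⟨(PySem.Dict.empty : PySem.Dict Int Int).insert 0 1, 0, 0, 0, 0⟩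

def runB (target : Int) (xs : List Int) : PySem.Dict Int Int × List Int × Int × Int :=
  xs.foldl (stepB target) ((PySem.Dict.empty : PySem.Dict Int Int).insert 0 0, [0], 0, 0)

def psum (xs : List Int) (k : Nat) : Int := (xs.take k).sum

def ansI (target : Int) (xs : List Int) : Int := (runI target xs).a

-- the instrumented run projects onto A's run
lemma foldl_stepA_eq_proj (target : Int) (xs : List Int) :
    ∀ (f : PySem.Dict Int Int) (s a : Int) (c i : Nat),
      xs.foldl (stepA target) (f, s, a) =
        ((xs.foldl (stepI target) ⟨f, s, a, c, i⟩).f,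
         (xs.foldl (stepI target) ⟨f, s, a, c, i⟩).s,
         (xs.foldl (stepI target) ⟨f, s, a, c, i⟩).a) := by
  induction xs with
  | nil => intro f s a c i; rfl
  | cons x xs ih =>
      intro f s a c i
      simp only [List.foldl_cons, stepA, stepI]
      by_cases h : (f.contains (s + x - target)) = true
      · simp only [h, if_pos]; exact ih _ _ _ _ _
      · simp only [Bool.not_eq_true] at h
        simp only [h]; exact ih _ _ _ _ _

lemma portA_eq (nums : List Int) (target : Int) :
    maxNonOverlapping nums target = ansI target nums := by
  unfold maxNonOverlapping ansI runI
  rw [foldl_stepA_eq_proj target nums _ 0 0 0 0]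

lemma getD_append_lt (l : List Int) (x d : Int) (k : Nat) (h : k < l.length) :
    (l ++ [x]).getD k d = l.getD k d := by
  simp [List.getD, List.getElem?_append_left h]

lemma getD_append_len (l : List Int) (x d : Int) :
    (l ++ [x]).getD l.length d = x := by
  simp [List.getD]

lemma psum_append_le (xs : List Int) (x : Int) (k : Nat) (h : k ≤ xs.length) :
    psum (xs ++ [x]) k = psum xs k := by
  unfold psum
  rw [List.take_append_of_le_length h]

lemma psum_append_len (xs : List Int) (x : Int) :
    psum (xs ++ [x]) (xs.length + 1) = xs.sum + x := by
  unfold psum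
  rw [show xs.length + 1 = (xs ++ [x]).length by simp, List.take_length]
  simp

lemma take_append_le (xs : List Int) (x : Int) (k : Nat) (h : k ≤ xs.length) :
    (xs ++ [x]).take k = xs.take k :=
  List.take_append_of_le_length h

-- the full invariant tying A's instrumented run to B's run after consuming xs
structure LoopInv (target : Int) (xs : List Int) : Prop where
  hs : (runI target xs).s = xs.sum
  hi : (runI target xs).i = xs.length
  hc : (runI target xs).c ≤ xs.length
  hf : ∀ v, ((runI target xs).f.get? v).isSome = true ↔
        ∃ k, (runI target xs).c ≤ k ∧ k ≤ xs.length ∧ psum xs k = v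
  hmono : ∀ k, k ≤ xs.length → ansI target (xs.take k) ≤ ansI target xs
  heq : ∀ k, (runI target xs).c ≤ k → k ≤ xs.length → ansI target (xs.take k) = ansI target xs
  hlt : ∀ k, k < (runI target xs).c → ansI target (xs.take k) + 1 ≤ ansI target xs
  hsB : (runB target xs).2.2.1 = xs.sum
  hiB : (runB target xs).2.2.2 = (xs.length : Int)
  hlen : (runB target xs).2.1.length = xs.length + 1
  hdp : ∀ k, k ≤ xs.length → (runB target xs).2.1.getD k 0 = ansI target (xs.take k)
  hseen : ∀ v k, (runB target xs).1.get? v = some k ↔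
        ∃ kn : Nat, k = (kn : Int) ∧ kn ≤ xs.length ∧ psum xs kn = v ∧
          ∀ m : Nat, kn < m → m ≤ xs.length → psum xs m ≠ v
  hnone : ∀ v, (runB target xs).1.get? v = none → ∀ k : Nat, k ≤ xs.length → psum xs k ≠ v


lemma inv (target : Int) (xs : List Int) : LoopInv target xs := by
  induction xs using List.reverseRecOn with
  | nil =>
      have hg : ∀ v : Int, (runB target []).1.get? v = if v = 0 then some 0 else none := by
        intro v
        show (((PySem.Dict.empty : PySem.Dict Int Int).insert 0 0).get? v) = _
        rw [PySem.Dict.get?_insert, PySem.Dict.get?_empty]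
      have hgI : ∀ v : Int, (runI target []).f.get? v = if v = 0 then some 1 else none := by
        intro v
        show (((PySem.Dict.empty : PySem.Dict Int Int).insert 0 1).get? v) = _
        rw [PySem.Dict.get?_insert, PySem.Dict.get?_empty]
      refine ⟨rfl, rfl, le_refl _, ?_, ?_, ?_, ?_, rfl, rfl, rfl, ?_, ?_, ?_⟩
      · intro v
        rw [hgI v]
        constructor
        · intro h
          by_cases hv : v = 0
          · exact ⟨0, le_refl _, le_refl _, by simp [psum, hv]⟩
          · simp [hv] at h
        · rintro ⟨k, -, hk0, hv⟩
          have hk : k = 0 := Nat.le_zero.mp hk0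
          subst hk
          have : v = 0 := by simpa [psum] using hv.symm
          simp [this]
      · intro k _; simp
      · intro k _ hk0
        have : k = 0 := Nat.le_zero.mp hk0
        subst this; simp
      · intro k hk; exact absurd hk (by simp [runI])
      · intro k hk0
        have : k = 0 := Nat.le_zero.mp hk0
        subst this; rfl
      · intro v k
        rw [hg v]
        constructor
        · intro h
          by_cases hv : v = 0
          · subst hv
            rw [if_pos rfl] at h
            injection h with h'
            exact ⟨0, h'.symm, le_refl _, by simp [psum],
              by intro m hm hm2; simp at hm2; omega⟩
          · simp [hv] at h
        · rintro ⟨kn, hk, hkn, hps, -⟩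
          have : kn = 0 := Nat.le_zero.mp hkn
          subst this
          have hv : v = 0 := by simpa [psum] using hps.symm
          subst hv
          simp [hk]
      · intro v h k hk0
        have : k = 0 := Nat.le_zero.mp hk0
        subst this
        rw [hg v] at h
        by_cases hv : v = 0
        · simp [hv] at h
        · simpa [psum] using Ne.symm hv
  | append_singleton xs x ih =>
    have hrI : runI target (xs ++ [x]) = stepI target (runI target xs) x := by
      unfold runI; rw [List.foldl_append]; rfl
    have hrB : runB target (xs ++ [x]) = stepB target (runB target xs) x := by
      unfold runB; rw [List.foldl_append]; rfl
    set r := runI target xs with hr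
    set b := runB target xs with hb
    set n := xs.length with hn
    have hlen' : (xs ++ [x]).length = n + 1 := by simp [hn]
    have hpsn : psum (xs ++ [x]) (n + 1) = xs.sum + x := psum_append_len xs x
    have hfiff : (r.f.contains (xs.sum + x - target) = true) ↔
        ∃ k, r.c ≤ k ∧ k ≤ n ∧ psum xs k = xs.sum + x - target := by
      rw [PySem.Dict.contains_eq_isSome_get?]; exact ih.hf _
    have hanx : ansI target xs = r.a := rfl
    have htk : ∀ k : Nat, k ≤ n → (xs ++ [x]).take k = xs.take k :=
      fun k hk => take_append_le xs x k hk
    have htk' : (xs ++ [x]).take (n + 1) = xs ++ [x] := List.take_of_length_le (by simp [hn])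
    have hnn : (n : Int) + 1 - 1 = (n : Int) := by ring
    have hd0 : b.2.1.getD n 0 = r.a := by
      rw [ih.hdp n (le_refl n)]
      have hte : xs.take n = xs := by rw [hn]; exact List.take_length
      rw [hte]; exact hanx
    -- B's one step, with its dp entry already identified with A's new answer
    have hB' : runB target (xs ++ [x]) =
        (b.1.insert (xs.sum + x) ((n : Int) + 1),
         b.2.1 ++ [if r.f.contains (xs.sum + x - target) = true then r.a + 1 else r.a],
         xs.sum + x, (n : Int) + 1) := by
      rw [hrB]
      simp only [stepB]
      rw [ih.hsB, ih.hiB, hnn, PySem.List.pyGetD_natCast, hd0]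
      cases hget : b.1.get? (xs.sum + x - target) with
      | none =>
          have hbc : b.1.contains (xs.sum + x - target) = false := by
            rw [PySem.Dict.contains_eq_isSome_get?, hget]; rfl
          have hnf : r.f.contains (xs.sum + x - target) = false := by
            cases hcc : r.f.contains (xs.sum + x - target) with
            | false => rfl
            | true =>
                obtain ⟨k, _, hkle, hpk⟩ := hfiff.mp hcc
                exact absurd hpk (ih.hnone _ hget k hkle)
          simp [hbc, hnf, hn]
      | some kv =>
          obtain ⟨kn, hkv, hkn, hps, hmax⟩ := (ih.hseen _ kv).mp hget
          subst hkv
          have hbc : b.1.contains (xs.sum + x - target) = true := by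
            rw [PySem.Dict.contains_eq_isSome_get?, hget]; rfl
          have hgd : b.1.getD (xs.sum + x - target) 0 = (kn : Int) := by
            rw [PySem.Dict.getD_eq_get?_getD, hget]; rfl
          by_cases hck : r.c ≤ kn
          · have hfir : r.f.contains (xs.sum + x - target) = true :=
              hfiff.mpr ⟨kn, hck, hkn, hps⟩
            have e1 : ansI target (List.take kn xs) = r.a :=
              (ih.heq kn hck hkn).trans hanx
            have hdk : b.2.1[kn]?.getD 0 = ansI target (List.take kn xs) := by
              simpa [List.getD] using ih.hdp kn hkn
            simp [hbc, hgd, PySem.List.pyGetD_natCast, hdk, e1, hfir, hn]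
          · have hck2 : kn < r.c := by omega
            have hnf : r.f.contains (xs.sum + x - target) = false := by
              cases hcc : r.f.contains (xs.sum + x - target) with
              | false => rfl
              | true =>
                  obtain ⟨k, hck3, hkle, hpk⟩ := hfiff.mp hcc
                  have hknk : ¬ kn < k := fun hlt => hmax k hlt hkle hpk
                  omega
            have hle : ansI target (List.take kn xs) + 1 ≤ r.a := by
              have := ih.hlt kn hck2
              rw [hanx] at this; exact this
            have hdk : b.2.1[kn]?.getD 0 = ansI target (List.take kn xs) := by
              simpa [List.getD] using ih.hdp kn hkn
            have hcond : ¬ (r.a ≤ ansI target (List.take kn xs)) := by omega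
            simp [hbc, hgd, PySem.List.pyGetD_natCast, hdk, hnf, hcond, hn]
    -- A's one step
    have hI' : runI target (xs ++ [x]) =
        ⟨(if r.f.contains (xs.sum + x - target) = true then
            (PySem.Dict.empty : PySem.Dict Int Int) else r.f).insert (xs.sum + x) 1,
         xs.sum + x,
         (if r.f.contains (xs.sum + x - target) = true then r.a + 1 else r.a),
         (if r.f.contains (xs.sum + x - target) = true then n + 1 else r.c),
         n + 1⟩ := by
      rw [hrI]
      simp only [stepI]
      rw [ih.hs, ih.hi]
      by_cases hfc : r.f.contains (xs.sum + x - target) = true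
      · simp [hfc, hn]
      · simp [hfc, hn]
    have hcc0 : r.c ≤ n := ih.hc
    have hFf : (runI target (xs ++ [x])).f =
        (if r.f.contains (xs.sum + x - target) = true then
          (PySem.Dict.empty : PySem.Dict Int Int) else r.f).insert (xs.sum + x) 1 := by rw [hI']
    have hSs : (runI target (xs ++ [x])).s = xs.sum + x := by rw [hI']
    have hAa : (runI target (xs ++ [x])).a =
        (if r.f.contains (xs.sum + x - target) = true then r.a + 1 else r.a) := by rw [hI']
    have hCc : (runI target (xs ++ [x])).c =
        (if r.f.contains (xs.sum + x - target) = true then n + 1 else r.c) := by rw [hI']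
    have hIi : (runI target (xs ++ [x])).i = n + 1 := by rw [hI']
    have hax' : ansI target (xs ++ [x]) =
        (if r.f.contains (xs.sum + x - target) = true then r.a + 1 else r.a) := hAa
    have hBseen : (runB target (xs ++ [x])).1 =
        b.1.insert (xs.sum + x) ((n : Int) + 1) := by rw [hB']
    have hBdp : (runB target (xs ++ [x])).2.1 =
        b.2.1 ++ [if r.f.contains (xs.sum + x - target) = true then r.a + 1 else r.a] := by
      rw [hB']
    have hBs : (runB target (xs ++ [x])).2.2.1 = xs.sum + x := by rw [hB']
    have hBi : (runB target (xs ++ [x])).2.2.2 = (n : Int) + 1 := by rw [hB']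
    refine ⟨?_, ?_, ?_, ?_, ?_, ?_, ?_, ?_, ?_, ?_, ?_, ?_, ?_⟩
    · rw [hSs]; simp
    · rw [hIi, hlen']
    · rw [hCc, hlen']
      by_cases hfc : r.f.contains (xs.sum + x - target) = true
      · simp [hfc]
      · simp only [if_neg hfc]
        omega
    · intro v
      rw [hFf, hCc, hlen']
      rw [PySem.Dict.get?_insert]
      by_cases hv : v = xs.sum + x
      · rw [if_pos hv]
        constructor
        · intro _
          refine ⟨n + 1, ?_, le_refl _, by rw [hpsn, hv]⟩
          by_cases hfc : r.f.contains (xs.sum + x - target) = true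
          · simp [hfc]
          · simp only [if_neg hfc]
            omega
        · intro _; simp
      · rw [if_neg hv]
        by_cases hfc : r.f.contains (xs.sum + x - target) = true
        · simp only [if_pos hfc, PySem.Dict.get?_empty]
          constructor
          · intro h; exact absurd h (by simp)
          · rintro ⟨k, h1, h2, h3⟩
            have hk1 : k = n + 1 := by omega
            subst hk1
            rw [hpsn] at h3
            exact absurd h3.symm hv
        · simp only [if_neg hfc]
          rw [ih.hf v]
          constructor
          · rintro ⟨k, h1, h2, h3⟩
            exact ⟨k, h1, by omega, by rw [psum_append_le xs x k h2]; exact h3⟩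
          · rintro ⟨k, h1, h2, h3⟩
            have hkn : k ≤ n := by
              by_contra hgt
              have hk1 : k = n + 1 := by omega
              subst hk1
              rw [hpsn] at h3
              exact hv h3.symm
            exact ⟨k, h1, hkn, by rw [← psum_append_le xs x k hkn]; exact h3⟩
    · intro k hk
      rw [hlen'] at hk
      rw [hax']
      by_cases hkn : k ≤ n
      · rw [htk k hkn]
        have := ih.hmono k hkn
        rw [hanx] at this
        split_ifs <;> omega
      · have hk1 : k = n + 1 := by omega
        subst hk1
        rw [htk', hax']
    · intro k h1 h2
      rw [hCc] at h1
      rw [hlen'] at h2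
      rw [hax']
      by_cases hfc : r.f.contains (xs.sum + x - target) = true
      · rw [if_pos hfc] at h1
        have hk1 : k = n + 1 := by omega
        subst hk1
        rw [htk', hax', if_pos hfc]
      · rw [if_neg hfc] at h1
        by_cases hkn : k ≤ n
        · rw [htk k hkn]
          have := ih.heq k h1 hkn
          rw [hanx] at this
          rw [this, if_neg hfc]
        · have hk1 : k = n + 1 := by omega
          subst hk1
          rw [htk', hax', if_neg hfc]
    · intro k hkc
      rw [hCc] at hkc
      rw [hax']
      by_cases hfc : r.f.contains (xs.sum + x - target) = true
      · rw [if_pos hfc] at hkc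
        have hkn : k ≤ n := by omega
        rw [htk k hkn, if_pos hfc]
        have := ih.hmono k hkn
        rw [hanx] at this
        omega
      · rw [if_neg hfc] at hkc
        have hkn : k ≤ n := by omega
        rw [htk k hkn, if_neg hfc]
        have := ih.hlt k hkc
        rw [hanx] at this
        exact this
    · rw [hBs]; simp
    · rw [hBi, hlen']; push_cast; ring
    · rw [hBdp, hlen']
      have hbl : b.2.1.length = n + 1 := ih.hlen
      simp [hbl]
    · intro k hk
      rw [hlen'] at hk
      rw [hBdp]
      by_cases hkn : k ≤ n
      · have hklt : k < b.2.1.length := by rw [ih.hlen]; omega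
        rw [getD_append_lt _ _ _ k hklt, ih.hdp k hkn, htk k hkn]
      · have hk1 : k = n + 1 := by omega
        subst hk1
        rw [htk', hax']
        have hlb : n + 1 = b.2.1.length := by rw [ih.hlen, hn]
        rw [hlb, getD_append_len]
    · intro v k
      rw [hBseen, hlen']
      rw [PySem.Dict.get?_insert]
      by_cases hv : v = xs.sum + x
      · rw [if_pos hv]
        constructor
        · intro h
          injection h with h'
          refine ⟨n + 1, by push_cast; omega, le_refl _, by rw [hpsn, hv], ?_⟩
          intro m hm1 hm2
          omega
        · rintro ⟨kn, hk, hkn, hpskn, hmax⟩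
          have hkn1 : kn = n + 1 := by
            by_contra hne
            have hkn' : kn < n + 1 := by omega
            exact hmax (n + 1) hkn' (le_refl _) (by rw [hpsn]; exact hv.symm)
          subst hkn1
          rw [hk]
          norm_cast
      · rw [if_neg hv, ih.hseen v k]
        constructor
        · rintro ⟨kn, hk, hkn, hps2, hmax⟩
          have hkn'' : kn ≤ n := by omega
          refine ⟨kn, hk, by omega, by rw [psum_append_le xs x kn hkn'']; exact hps2, ?_⟩
          intro m hm1 hm2
          by_cases hmn : m ≤ n
          · rw [psum_append_le xs x m hmn]; exact hmax m hm1 hmn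
          · have hm3 : m = n + 1 := by omega
            subst hm3
            rw [hpsn]
            exact fun he => hv he.symm
        · rintro ⟨kn, hk, hkn, hps2, hmax⟩
          have hkn' : kn ≤ n := by
            by_contra hgt
            have hk1 : kn = n + 1 := by omega
            subst hk1
            rw [hpsn] at hps2
            exact hv hps2.symm
          refine ⟨kn, hk, hkn', by rw [← psum_append_le xs x kn hkn']; exact hps2, ?_⟩
          intro m hm1 hm2
          have hm2' : m ≤ n + 1 := by omega
          have := hmax m hm1 hm2'
          rw [psum_append_le xs x m hm2] at this
          exact this
    · intro v h k hk
      rw [hBseen] at h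
      rw [PySem.Dict.get?_insert] at h
      rw [hlen'] at hk
      by_cases hv : v = xs.sum + x
      · rw [if_pos hv] at h; exact absurd h (by simp)
      · rw [if_neg hv] at h
        by_cases hkn : k ≤ n
        · rw [psum_append_le xs x k hkn]
          exact ih.hnone v h k hkn
        · have hk1 : k = n + 1 := by omega
          subst hk1
          rw [hpsn]
          exact fun he => hv he.symm

-- ===== VERDICT (by name: the statement is the Claim_ definition above) =====
theorem maxNonOverlapping_spec : Claim_equal_maxNonOverlapping := by
  intro nums target _
  unfold Spec_maxNonOverlapping
  rw [portA_eq]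
  have h := inv target nums
  have halt : maxNonOverlapping_alt nums target = ansI target nums := by
    show PySem.List.pyGetD (runB target nums).2.1 (runB target nums).2.2.2 0 = _
    rw [h.hiB, PySem.List.pyGetD_natCast, h.hdp nums.length (le_refl _), List.take_length]
  rw [halt]
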